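-- pv_equiv track=rewrite | github.com/ksthink/joo-s-omok | server.py | build_influence_map
-- ===== SOURCE A (Python) =====
-- def build_influence_map(board, player):
--     """Build influence map showing connection potential."""
--     size = len(board)
--     influence = [[0] * size for _ in range(size)]
--
--     for r in range(size):
--         for c in range(size):
--             if board[r][c] == player:
--                 for dr in range(-4, 5):
--                     for dc in range(-4, 5):
--                         nr, nc = r + dr, c + dc
--                         if 0 <= nr < size and 0 <= nc < size and board[nr][nc] == 0:
--                             dist = max(abs(dr), abs(dc))
--                             influence[nr][nc] += 5 - dist
--     return influence
-- ===== SOURCE B (Python) =====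
-- def build_influence_map(board, player):
--     """Build influence map showing connection potential (gather formulation)."""
--     size = len(board)
--
--     def cell(r, c):
--         if board[r][c] != 0:
--             return 0
--         total = 0
--         for sr in range(max(0, r - 4), min(size, r + 5)):
--             for sc in range(max(0, c - 4), min(size, c + 5)):
--                 if board[sr][sc] == player:
--                     total += 5 - max(abs(sr - r), abs(sc - c))
--         return total
--
--     return [[cell(r, c) for c in range(size)] for r in range(size)]
-- ===== Notes on version B (the rewrite author's own statement) =====
-- stated objective: alternative
-- what changed: Scatter became gather: instead of every stone pushing 5-Chebyshev-distance weights into a mutable grid, each empty cell directly sums the weights of the stones in its clamped 9x9 neighbourhood and the result grid is built by a comprehension with no mutation.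
import Mathlib
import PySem

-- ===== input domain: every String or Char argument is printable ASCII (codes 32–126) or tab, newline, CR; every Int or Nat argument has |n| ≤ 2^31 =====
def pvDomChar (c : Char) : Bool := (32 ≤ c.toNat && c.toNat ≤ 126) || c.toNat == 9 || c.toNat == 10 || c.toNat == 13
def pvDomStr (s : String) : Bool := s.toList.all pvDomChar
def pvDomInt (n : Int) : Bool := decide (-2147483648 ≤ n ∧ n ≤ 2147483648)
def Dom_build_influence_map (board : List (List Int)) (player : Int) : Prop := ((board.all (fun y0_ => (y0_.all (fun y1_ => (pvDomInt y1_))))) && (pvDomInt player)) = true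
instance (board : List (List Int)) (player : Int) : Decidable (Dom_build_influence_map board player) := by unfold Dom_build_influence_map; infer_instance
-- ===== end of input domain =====

-- B replaces A's scatter (each stone pushes weights into a mutable grid) by a per-cell
-- gather (each empty cell sums 5 - Chebyshev distance over the stones in its clamped
-- 9×9 neighbourhood), building the result grid directly; objective: alternative.

-- ===== PORT A =====
-- board[i][j] read; inside Pre_ all indices used are in range, so the default is never returned
def pvGet2 (b : List (List Int)) (i j : Nat) : Int := (b.getD i []).getD j 0

-- influence[i][j] += v
def pvAddAt (g : List (List Int)) (i j : Nat) (v : Int) : List (List Int) :=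
  g.set i ((g.getD i []).set j ((g.getD i []).getD j 0 + v))

def build_influence_map (board : List (List Int)) (player : Int) : List (List Int) :=
  let size := board.length
  let influence := List.replicate size (List.replicate size (0 : Int))
  (List.range size).foldl (fun inf r =>
    (List.range size).foldl (fun inf c =>
      if pvGet2 board r c = player then
        (PySem.List.pyRange (-4) 5 1).foldl (fun inf dr =>
          (PySem.List.pyRange (-4) 5 1).foldl (fun inf dc =>
            let nr : Int := (r : Int) + dr
            let nc : Int := (c : Int) + dc
            if 0 ≤ nr ∧ nr < (size : Int) ∧ 0 ≤ nc ∧ nc < (size : Int) ∧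
                pvGet2 board nr.toNat nc.toNat = 0 then
              pvAddAt inf nr.toNat nc.toNat (5 - max |dr| |dc|)
            else inf) inf) inf
      else inf) inf) influence

-- ===== PORT B =====
-- range(a, b) over Nats, already clamped (Nat subtraction is Python's max(0, ·))
def pvNatRange (a b : Nat) : List Nat := List.range' a (b - a)

def pvCellB (board : List (List Int)) (player : Int) (size r c : Nat) : Int :=
  if pvGet2 board r c ≠ 0 then 0
  else
    (pvNatRange (r - 4) (min size (r + 5))).foldl (fun tot sr =>
      (pvNatRange (c - 4) (min size (c + 5))).foldl (fun tot sc =>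
        if pvGet2 board sr sc = player then
          tot + (5 - max |(sr : Int) - (r : Int)| |(sc : Int) - (c : Int)|)
        else tot) tot) 0

def build_influence_map_alt (board : List (List Int)) (player : Int) : List (List Int) :=
  let size := board.length
  (List.range size).map (fun r => (List.range size).map (fun c => pvCellB board player size r c))

-- ===== PRECONDITION & SPEC =====
-- Pre_ excludes exactly the boards with a row shorter than len(board), on which Python A
-- (and B) raises IndexError while indexing a square size×size region.
def Pre_build_influence_map (board : List (List Int)) (player : Int) : Prop :=
  ∀ row ∈ board, board.length ≤ row.length

instance (board : List (List Int)) (player : Int) : Decidable (Pre_build_influence_map board player) := by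
  unfold Pre_build_influence_map; infer_instance

def pvWitness_build_influence_map : List (List Int) × Int := ([[0, 1], [1, 0]], 1)

def Spec_build_influence_map (board : List (List Int)) (player : Int) (out : List (List Int)) : Prop := out = build_influence_map_alt board player
instance (board : List (List Int)) (player : Int) (out : List (List Int)) : Decidable (Spec_build_influence_map board player out) := by unfold Spec_build_influence_map; infer_instance

-- ===== CLAIM (what is proved, stated in full; the proofs are below) =====
def Claim_equal_build_influence_map : Prop := ∀ (board : List (List Int)) (player : Int), Dom_build_influence_map board player → Pre_build_influence_map board player → Spec_build_influence_map board player (build_influence_map board player)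

-- ===== LEMMAS AND PROOFS =====

-- the common mathematical value: what both ports put at cell (i, j)
def pvW (board : List (List Int)) (player : Int) (i j r c : Nat) : Int :=
  if pvGet2 board r c = player ∧ pvGet2 board i j = 0 ∧
      -4 ≤ (i : Int) - (r : Int) ∧ (i : Int) - (r : Int) < 5 ∧
      -4 ≤ (j : Int) - (c : Int) ∧ (j : Int) - (c : Int) < 5 then
    5 - max |(i : Int) - (r : Int)| |(j : Int) - (c : Int)|
  else 0

def pvS (n : Nat) (f : Nat → Int) : Int := ((List.range n).map f).sum

def pvSpec (board : List (List Int)) (player : Int) (i j : Nat) : Int :=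
  pvS board.length (fun r => pvS board.length (fun c => pvW board player i j r c))

def pvShape (n : Nat) (g : List (List Int)) : Prop :=
  g.length = n ∧ ∀ i, i < n → (g.getD i []).length = n

lemma pvGetD_set {α : Type} (m : List α) (a : Nat) (x : α) (i : Nat) (d : α) :
    (m.set a x).getD i d = if a = i ∧ a < m.length then x else m.getD i d := by
  simp only [List.getD_eq_getElem?_getD, List.getElem?_set]
  split_ifs <;> simp_all <;> omega

lemma pvShape_addAt {n : Nat} {g : List (List Int)} (h : pvShape n g) (a b : Nat) (v : Int) :
    pvShape n (pvAddAt g a b v) := by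
  obtain ⟨hl, hr⟩ := h
  refine ⟨by simpa [pvAddAt] using hl, ?_⟩
  intro i hi
  unfold pvAddAt
  rw [pvGetD_set]
  split_ifs with hcase
  · obtain ⟨rfl, _⟩ := hcase
    simpa using hr a (by omega)
  · exact hr i hi

lemma pvGet2_addAt {n : Nat} {g : List (List Int)} (h : pvShape n g) {i j : Nat}
    (hi : i < n) (hj : j < n) (a b : Nat) (v : Int) :
    pvGet2 (pvAddAt g a b v) i j = pvGet2 g i j + (if a = i ∧ b = j then v else 0) := by
  obtain ⟨hl, hr⟩ := h
  unfold pvGet2 pvAddAt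
  rw [pvGetD_set]
  by_cases hai : a = i
  · subst hai
    have halt : a < g.length := by omega
    simp only [halt, and_true, if_pos rfl, true_and, if_true]
    rw [pvGetD_set]
    by_cases hbj : b = j
    · subst hbj
      have hblen : b < (g.getD a []).length := by rw [hr a (by omega)]; omega
      rw [if_pos ⟨rfl, hblen⟩, if_pos rfl]
    · simp [hbj]
  · simp [hai]

lemma pvFold_shape {α : Type} (L : List α) (step : List (List Int) → α → List (List Int)) (n : Nat)
    (h : ∀ g e, pvShape n g → pvShape n (step g e)) :
    ∀ g, pvShape n g → pvShape n (L.foldl step g) := by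
  induction L with
  | nil => intro g hg; simpa using hg
  | cons e t ih => intro g hg; exact ih (step g e) (h g e hg)

lemma pvFold_read {α : Type} (L : List α) (step : List (List Int) → α → List (List Int))
    (δ : α → Int) (n i j : Nat)
    (h : ∀ g e, pvShape n g → pvShape n (step g e) ∧ pvGet2 (step g e) i j = pvGet2 g i j + δ e) :
    ∀ g, pvShape n g →
      pvShape n (L.foldl step g) ∧ pvGet2 (L.foldl step g) i j = pvGet2 g i j + (L.map δ).sum := by
  induction L with
  | nil => intro g hg; simpa using hg
  | cons e t ih =>
    intro g hg
    obtain ⟨h1, h2⟩ := h g e hg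
    obtain ⟨h3, h4⟩ := ih (step g e) h1
    exact ⟨h3, by simp [h4, h2, add_assoc]⟩

lemma pvStep_if {n i j : Nat} (C : Prop) [Decidable C] (g g' : List (List Int))
    (d : Int) (h : pvShape n g)
    (hF : pvShape n g' ∧ pvGet2 g' i j = pvGet2 g i j + d) :
    pvShape n (if C then g' else g) ∧
      pvGet2 (if C then g' else g) i j = pvGet2 g i j + (if C then d else 0) := by
  split_ifs with hC
  · exact hF
  · exact ⟨h, by ring⟩

lemma pvSum_single (L : List Int) (f : Int → Int) (t : Int) (hnd : L.Nodup)
    (hf : ∀ x ∈ L, x ≠ t → f x = 0) :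
    (L.map f).sum = if t ∈ L then f t else 0 := by
  induction L with
  | nil => simp
  | cons a l ih =>
    simp only [List.nodup_cons] at hnd
    by_cases ha : a = t
    · subst ha
      have hz : ∀ x ∈ l, f x = 0 := fun x hx => hf x (List.mem_cons_of_mem _ hx) (fun h => hnd.1 (h ▸ hx))
      have : (List.map f l).sum = 0 := List.sum_eq_zero (by
        intro y hy; obtain ⟨x, hx, rfl⟩ := List.mem_map.1 hy; exact hz x hx)
      simp [this]
    · have := ih hnd.2 (fun x hx => hf x (List.mem_cons_of_mem _ hx))
      simp [this, hf a (List.mem_cons_self) ha, List.mem_cons, Ne.symm ha]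

lemma pvFoldl_shift {α : Type} (L : List α) (f : Int → α → Int) (h : α → Int)
    (hf : ∀ t x, f t x = t + h x) : ∀ t, L.foldl f t = t + (L.map h).sum := by
  induction L with
  | nil => intro t; simp
  | cons a l ih => intro t; simp only [List.foldl_cons, hf, List.map_cons, List.sum_cons, ih, add_assoc]

lemma pvSum_extend (a b n : Nat) (f : Nat → Int) (hab : a ≤ b) (hb : b ≤ n)
    (h0 : ∀ x, x < n → ¬ (a ≤ x ∧ x < b) → f x = 0) :
    ((List.range' a (b - a)).map f).sum = ((List.range n).map f).sum := by
  have e1 : List.range' a (b - a) 1 ++ List.range' (a + 1 * (b - a)) (n - b) 1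
      = List.range' a ((b - a) + (n - b)) 1 := List.range'_append
  rw [show a + 1 * (b - a) = b by omega, show (b - a) + (n - b) = n - a by omega] at e1
  have e2 : List.range' 0 a 1 ++ List.range' (0 + 1 * a) (n - a) 1
      = List.range' 0 (a + (n - a)) 1 := List.range'_append
  rw [show 0 + 1 * a = a by omega, show a + (n - a) = n from by omega] at e2
  have hz1 : ((List.range' 0 a 1).map f).sum = 0 := List.sum_eq_zero (by
    intro y hy; obtain ⟨x, hx, rfl⟩ := List.mem_map.1 hy
    rw [List.mem_range'_1] at hx
    exact h0 x (by omega) (by omega))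
  have hz2 : ((List.range' b (n - b) 1).map f).sum = 0 := List.sum_eq_zero (by
    intro y hy; obtain ⟨x, hx, rfl⟩ := List.mem_map.1 hy
    rw [List.mem_range'_1] at hx
    exact h0 x (by omega) (by omega))
  rw [List.range_eq_range', ← e2, ← e1]
  simp [List.map_append, List.sum_append, hz1, hz2]

-- deltas read off A's four nested loops
def pvD2 (board : List (List Int)) (i j r c : Nat) (dr dc : Int) : Int :=
  if 0 ≤ (r : Int) + dr ∧ (r : Int) + dr < (board.length : Int) ∧ 0 ≤ (c : Int) + dc ∧
      (c : Int) + dc < (board.length : Int) ∧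
      pvGet2 board ((r : Int) + dr).toNat ((c : Int) + dc).toNat = 0 then
    (if ((r : Int) + dr).toNat = i ∧ ((c : Int) + dc).toNat = j then 5 - max |dr| |dc| else 0)
  else 0

def pvD1 (board : List (List Int)) (i j r c : Nat) : Int :=
  ((PySem.List.pyRange (-4) 5 1).map
    (fun dr => ((PySem.List.pyRange (-4) 5 1).map (pvD2 board i j r c dr)).sum)).sum

def pvD0 (board : List (List Int)) (player : Int) (i j r : Nat) : Int :=
  ((List.range board.length).map
    (fun c => if pvGet2 board r c = player then pvD1 board i j r c else 0)).sum

lemma pvShape_rep (n : Nat) : pvShape n (List.replicate n (List.replicate n (0 : Int))) := by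
  refine ⟨by simp, ?_⟩
  intro i hi
  simp [List.getD_eq_getElem?_getD, List.getElem?_replicate, hi]

lemma pvGet2_rep (n i j : Nat) : pvGet2 (List.replicate n (List.replicate n (0 : Int))) i j = 0 := by
  unfold pvGet2
  simp only [List.getD_eq_getElem?_getD, List.getElem?_replicate]
  split_ifs <;> simp

lemma pvA_shape (board : List (List Int)) (player : Int) :
    pvShape board.length (build_influence_map board player) := by
  unfold build_influence_map
  dsimp only
  refine pvFold_shape _ _ _ ?_ _ (pvShape_rep board.length)
  intro g r hg
  refine pvFold_shape _ _ _ ?_ g hg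
  intro g c hg
  split_ifs with h1
  · refine pvFold_shape _ _ _ ?_ g hg
    intro g dr hg
    refine pvFold_shape _ _ _ ?_ g hg
    intro g dc hg
    split_ifs with h2
    · exact pvShape_addAt hg _ _ _
    · exact hg
  · exact hg

lemma pvA_read (board : List (List Int)) (player : Int) {i j : Nat}
    (hi : i < board.length) (hj : j < board.length) :
    pvGet2 (build_influence_map board player) i j =
      ((List.range board.length).map (pvD0 board player i j)).sum := by
  unfold build_influence_map
  dsimp only
  have Hdc : ∀ (r c : Nat) (dr : Int) (g : List (List Int)) (dc : Int), pvShape board.length g →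
      pvShape board.length
        (if 0 ≤ (r : Int) + dr ∧ (r : Int) + dr < (board.length : Int) ∧ 0 ≤ (c : Int) + dc ∧
            (c : Int) + dc < (board.length : Int) ∧
            pvGet2 board ((r : Int) + dr).toNat ((c : Int) + dc).toNat = 0 then
          pvAddAt g ((r : Int) + dr).toNat ((c : Int) + dc).toNat (5 - max |dr| |dc|)
        else g) ∧
      pvGet2
        (if 0 ≤ (r : Int) + dr ∧ (r : Int) + dr < (board.length : Int) ∧ 0 ≤ (c : Int) + dc ∧
            (c : Int) + dc < (board.length : Int) ∧
            pvGet2 board ((r : Int) + dr).toNat ((c : Int) + dc).toNat = 0 then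
          pvAddAt g ((r : Int) + dr).toNat ((c : Int) + dc).toNat (5 - max |dr| |dc|)
        else g) i j = pvGet2 g i j + pvD2 board i j r c dr dc := by
    intro r c dr g dc hg
    exact pvStep_if _ g _ _ hg ⟨pvShape_addAt hg _ _ _, pvGet2_addAt hg hi hj _ _ _⟩
  have Hdr : ∀ (r c : Nat) (g : List (List Int)) (dr : Int), pvShape board.length g →
      pvShape board.length
        ((PySem.List.pyRange (-4) 5 1).foldl (fun inf dc =>
          if 0 ≤ (r : Int) + dr ∧ (r : Int) + dr < (board.length : Int) ∧ 0 ≤ (c : Int) + dc ∧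
              (c : Int) + dc < (board.length : Int) ∧
              pvGet2 board ((r : Int) + dr).toNat ((c : Int) + dc).toNat = 0 then
            pvAddAt inf ((r : Int) + dr).toNat ((c : Int) + dc).toNat (5 - max |dr| |dc|)
          else inf) g) ∧
      pvGet2 ((PySem.List.pyRange (-4) 5 1).foldl (fun inf dc =>
          if 0 ≤ (r : Int) + dr ∧ (r : Int) + dr < (board.length : Int) ∧ 0 ≤ (c : Int) + dc ∧
              (c : Int) + dc < (board.length : Int) ∧
              pvGet2 board ((r : Int) + dr).toNat ((c : Int) + dc).toNat = 0 then
            pvAddAt inf ((r : Int) + dr).toNat ((c : Int) + dc).toNat (5 - max |dr| |dc|)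
          else inf) g) i j =
        pvGet2 g i j + ((PySem.List.pyRange (-4) 5 1).map (pvD2 board i j r c dr)).sum := by
    intro r c g dr hg
    exact pvFold_read _ _ (pvD2 board i j r c dr) board.length i j
      (fun g' dc hg' => Hdc r c dr g' dc hg') g hg
  have HdrF : ∀ (r c : Nat) (g : List (List Int)), pvShape board.length g →
      pvShape board.length
        ((PySem.List.pyRange (-4) 5 1).foldl (fun inf dr =>
          (PySem.List.pyRange (-4) 5 1).foldl (fun inf dc =>
            if 0 ≤ (r : Int) + dr ∧ (r : Int) + dr < (board.length : Int) ∧ 0 ≤ (c : Int) + dc ∧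
                (c : Int) + dc < (board.length : Int) ∧
                pvGet2 board ((r : Int) + dr).toNat ((c : Int) + dc).toNat = 0 then
              pvAddAt inf ((r : Int) + dr).toNat ((c : Int) + dc).toNat (5 - max |dr| |dc|)
            else inf) inf) g) ∧
      pvGet2 ((PySem.List.pyRange (-4) 5 1).foldl (fun inf dr =>
          (PySem.List.pyRange (-4) 5 1).foldl (fun inf dc =>
            if 0 ≤ (r : Int) + dr ∧ (r : Int) + dr < (board.length : Int) ∧ 0 ≤ (c : Int) + dc ∧
                (c : Int) + dc < (board.length : Int) ∧
                pvGet2 board ((r : Int) + dr).toNat ((c : Int) + dc).toNat = 0 then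
              pvAddAt inf ((r : Int) + dr).toNat ((c : Int) + dc).toNat (5 - max |dr| |dc|)
            else inf) inf) g) i j = pvGet2 g i j + pvD1 board i j r c := by
    intro r c g hg
    exact pvFold_read _ _
      (fun dr => ((PySem.List.pyRange (-4) 5 1).map (pvD2 board i j r c dr)).sum)
      board.length i j (fun g' dr hg' => Hdr r c g' dr hg') g hg
  have Hc : ∀ (r : Nat) (g : List (List Int)) (c : Nat), pvShape board.length g →
      pvShape board.length
        (if pvGet2 board r c = player then
          (PySem.List.pyRange (-4) 5 1).foldl (fun inf dr =>
            (PySem.List.pyRange (-4) 5 1).foldl (fun inf dc =>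
              if 0 ≤ (r : Int) + dr ∧ (r : Int) + dr < (board.length : Int) ∧ 0 ≤ (c : Int) + dc ∧
                  (c : Int) + dc < (board.length : Int) ∧
                  pvGet2 board ((r : Int) + dr).toNat ((c : Int) + dc).toNat = 0 then
                pvAddAt inf ((r : Int) + dr).toNat ((c : Int) + dc).toNat (5 - max |dr| |dc|)
              else inf) inf) g
        else g) ∧
      pvGet2
        (if pvGet2 board r c = player then
          (PySem.List.pyRange (-4) 5 1).foldl (fun inf dr =>
            (PySem.List.pyRange (-4) 5 1).foldl (fun inf dc =>
              if 0 ≤ (r : Int) + dr ∧ (r : Int) + dr < (board.length : Int) ∧ 0 ≤ (c : Int) + dc ∧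
                  (c : Int) + dc < (board.length : Int) ∧
                  pvGet2 board ((r : Int) + dr).toNat ((c : Int) + dc).toNat = 0 then
                pvAddAt inf ((r : Int) + dr).toNat ((c : Int) + dc).toNat (5 - max |dr| |dc|)
              else inf) inf) g
        else g) i j =
      pvGet2 g i j + (if pvGet2 board r c = player then pvD1 board i j r c else 0) := by
    intro r g c hg
    exact pvStep_if _ g _ _ hg (HdrF r c g hg)
  obtain ⟨-, hfin⟩ := pvFold_read (List.range board.length) _ (pvD0 board player i j)
    board.length i j
    (fun g r hg => pvFold_read (List.range board.length) _
      (fun c => if pvGet2 board r c = player then pvD1 board i j r c else 0)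
      board.length i j (fun g' c hg' => Hc r g' c hg') g hg)
    (List.replicate board.length (List.replicate board.length 0)) (pvShape_rep board.length)
  rw [hfin, pvGet2_rep, zero_add]

lemma pvD_eq_W (board : List (List Int)) (player : Int) {i j r c : Nat}
    (hi : i < board.length) (hj : j < board.length) :
    (if pvGet2 board r c = player then pvD1 board i j r c else 0) = pvW board player i j r c := by
  by_cases hstone : pvGet2 board r c = player
  · rw [if_pos hstone]
    unfold pvD1
    rw [pvSum_single _ _ ((i : Int) - (r : Int)) (PySem.List.nodup_pyRange_one (-4) 5) ?hf1]
    case hf1 =>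
      intro dr _ hne
      apply List.sum_eq_zero
      intro y hy; obtain ⟨dc, -, rfl⟩ := List.mem_map.1 hy
      unfold pvD2
      split_ifs with h1 h2
      · exfalso
        obtain ⟨h1a, h1b, h1c, h1d, h1e⟩ := h1
        obtain ⟨h2a, h2b⟩ := h2
        omega
      · rfl
      · rfl
    rw [pvSum_single _ _ ((j : Int) - (c : Int)) (PySem.List.nodup_pyRange_one (-4) 5) ?hf2]
    case hf2 =>
      intro dc _ hne
      unfold pvD2
      split_ifs with h1 h2
      · exfalso
        obtain ⟨h1a, h1b, h1c, h1d, h1e⟩ := h1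
        obtain ⟨h2a, h2b⟩ := h2
        omega
      · rfl
      · rfl
    unfold pvD2
    simp only [show (r : Int) + ((i : Int) - (r : Int)) = (i : Int) from by ring,
      show (c : Int) + ((j : Int) - (c : Int)) = (j : Int) from by ring,
      Int.toNat_natCast, PySem.List.mem_pyRange_one]
    have hi' : (i : Int) < (board.length : Int) := by exact_mod_cast hi
    have hj' : (j : Int) < (board.length : Int) := by exact_mod_cast hj
    simp only [Int.natCast_nonneg, hi', hj', true_and, and_true, if_true]
    unfold pvW
    split_ifs <;> tauto
  · rw [if_neg hstone]
    unfold pvW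
    rw [if_neg (fun h => hstone h.1)]

lemma pvB_cell (board : List (List Int)) (player : Int) {i j : Nat}
    (hi : i < board.length) (hj : j < board.length) :
    pvCellB board player board.length i j = pvSpec board player i j := by
  unfold pvCellB
  by_cases h0 : pvGet2 board i j = 0
  · rw [if_neg (by simp [h0])]
    have inner : ∀ (sr : Nat) (t : Int),
        (pvNatRange (j - 4) (min board.length (j + 5))).foldl (fun tot sc =>
          if pvGet2 board sr sc = player then
            tot + (5 - max |(sr : Int) - (i : Int)| |(sc : Int) - (j : Int)|)
          else tot) t
        = t + ((pvNatRange (j - 4) (min board.length (j + 5))).map (fun sc =>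
            if pvGet2 board sr sc = player then
              5 - max |(sr : Int) - (i : Int)| |(sc : Int) - (j : Int)|
            else 0)).sum := by
      intro sr t
      refine pvFoldl_shift _ _ _ ?_ t
      intro t' x
      split_ifs <;> simp
    rw [pvFoldl_shift _ _ (fun sr => ((pvNatRange (j - 4) (min board.length (j + 5))).map (fun sc =>
          if pvGet2 board sr sc = player then
            5 - max |(sr : Int) - (i : Int)| |(sc : Int) - (j : Int)|
          else 0)).sum) (fun t sr => inner sr t) 0, zero_add]
    have step1 : ∀ sr ∈ pvNatRange (i - 4) (min board.length (i + 5)),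
        ((pvNatRange (j - 4) (min board.length (j + 5))).map (fun sc =>
          if pvGet2 board sr sc = player then
            5 - max |(sr : Int) - (i : Int)| |(sc : Int) - (j : Int)|
          else 0)).sum = pvS board.length (fun c => pvW board player i j sr c) := by
      intro sr hsr
      unfold pvNatRange at hsr
      rw [List.mem_range'_1] at hsr
      have heq : ((pvNatRange (j - 4) (min board.length (j + 5))).map (fun sc =>
          if pvGet2 board sr sc = player then
            5 - max |(sr : Int) - (i : Int)| |(sc : Int) - (j : Int)|
          else 0)) = ((pvNatRange (j - 4) (min board.length (j + 5))).map
            (fun sc => pvW board player i j sr sc)) := by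
        apply List.map_congr_left
        intro sc hsc
        unfold pvNatRange at hsc
        rw [List.mem_range'_1] at hsc
        by_cases hst : pvGet2 board sr sc = player
        · rw [if_pos hst, pvW, if_pos ⟨hst, h0, by omega, by omega, by omega, by omega⟩,
            abs_sub_comm ((sr : Int)) ((i : Int)), abs_sub_comm ((sc : Int)) ((j : Int))]
        · rw [if_neg hst, pvW, if_neg (fun h => hst h.1)]
      rw [heq]
      unfold pvNatRange pvS
      apply pvSum_extend (j - 4) (min board.length (j + 5)) board.length
        (fun sc => pvW board player i j sr sc) (by omega) (by omega)
      intro x hx hout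
      unfold pvW
      rw [if_neg]
      intro h
      obtain ⟨-, -, -, -, hc1, hc2⟩ := h
      omega
    rw [List.map_congr_left step1]
    unfold pvNatRange
    rw [pvSum_extend (i - 4) (min board.length (i + 5)) board.length _ (by omega) (by omega) ?hout]
    case hout =>
      intro x hx hout
      apply List.sum_eq_zero
      intro y hy
      obtain ⟨c', -, rfl⟩ := List.mem_map.1 hy
      unfold pvW
      rw [if_neg]
      intro h
      obtain ⟨-, -, hr1, hr2, -, -⟩ := h
      omega
    rfl
  · rw [if_pos h0]
    symm
    unfold pvSpec pvS
    apply List.sum_eq_zero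
    intro y hy
    obtain ⟨r', -, rfl⟩ := List.mem_map.1 hy
    apply List.sum_eq_zero
    intro z hz
    obtain ⟨c', -, rfl⟩ := List.mem_map.1 hz
    unfold pvW
    rw [if_neg (fun h => h0 h.2.1)]

-- ===== VERDICT (by name: the statement is the Claim_ definition above) =====
theorem build_influence_map_spec : Claim_equal_build_influence_map := by
  intro board player _ _
  unfold Spec_build_influence_map build_influence_map_alt
  dsimp only
  have hshape := pvA_shape board player
  apply List.ext_getElem
  · rw [hshape.1]; simp
  · intro i h1 h2
    have hi : i < board.length := by simpa [hshape.1] using h1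
    have hrow : (build_influence_map board player)[i] = (build_influence_map board player).getD i [] := by
      rw [List.getD_eq_getElem?_getD, List.getElem?_eq_getElem h1]; rfl
    simp only [List.getElem_map, List.getElem_range]
    apply List.ext_getElem
    · rw [hrow, hshape.2 i hi]; simp
    · intro j hj1 hj2
      have hj : j < board.length := by
        rw [hrow, hshape.2 i hi] at hj1; exact hj1
      simp only [List.getElem_map, List.getElem_range]
      have hentry : (build_influence_map board player)[i][j] = pvGet2 (build_influence_map board player) i j := by
        unfold pvGet2
        rw [← hrow, List.getD_eq_getElem?_getD, List.getElem?_eq_getElem hj1]; rfl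
      rw [hentry, pvA_read board player hi hj, pvB_cell board player hi hj]
      have hmaps : (List.range board.length).map (pvD0 board player i j)
          = (List.range board.length).map
              (fun r => ((List.range board.length).map (fun c => pvW board player i j r c)).sum) :=
        List.map_congr_left (fun r _ => by
          unfold pvD0
          rw [List.map_congr_left (fun c _ => pvD_eq_W board player hi hj)])
      rw [hmaps]
      rfl
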